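-- pv_equiv track=rewrite | github.com/brandonprescher-creator/mine | api_integrations.py | get_common_core_standards
-- ===== SOURCE A (Python) =====
-- from typing import List, Dict, Optional
--
-- def get_common_core_standards(subject: str, grade: str = "") -> List[Dict]:
--     """
--     Get Common Core standards information.
--     This is a simplified version - for production, integrate with a standards database.
--     """
--     standards = {
--         'Math': {
--             'Division': [
--                 "CCSS.MATH.CONTENT.3.OA.A.2: Interpret whole-number quotients of whole numbers",
--                 "CCSS.MATH.CONTENT.3.OA.A.3: Use multiplication and division within 100 to solve word problems",
--                 "CCSS.MATH.CONTENT.4.NBT.B.6: Find whole-number quotients using strategies based on place value",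
--                 "CCSS.MATH.CONTENT.5.NBT.B.6: Find quotients of whole numbers with up to four-digit dividends"
--             ],
--             'Fractions': [
--                 "CCSS.MATH.CONTENT.3.NF.A.1: Understand a fraction as a part of a whole",
--                 "CCSS.MATH.CONTENT.4.NF.A.1: Explain why fractions are equivalent",
--                 "CCSS.MATH.CONTENT.5.NF.A.1: Add and subtract fractions with unlike denominators"
--             ]
--         },
--         'ELA': {
--             'Reading': [
--                 "CCSS.ELA-LITERACY.RL.3.1: Ask and answer questions to demonstrate understanding",
--                 "CCSS.ELA-LITERACY.RL.4.2: Determine theme from details; summarize",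
--                 "CCSS.ELA-LITERACY.RL.5.3: Compare and contrast characters, settings, events"
--             ]
--         }
--     }
--
--     results = []
--     subject_data = standards.get(subject, {})
--     for topic, stds in subject_data.items():
--         results.extend([{'standard': s, 'topic': topic} for s in stds])
--
--     return results
-- ===== SOURCE B (Python) =====
-- from typing import List, Dict
--
-- # Flat record table, laid out in exactly the order A emits: Math/Division,
-- # Math/Fractions, ELA/Reading.
-- _CCSS = [
--     ("Math", "Division", "CCSS.MATH.CONTENT.3.OA.A.2: Interpret whole-number quotients of whole numbers"),
--     ("Math", "Division", "CCSS.MATH.CONTENT.3.OA.A.3: Use multiplication and division within 100 to solve word problems"),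
--     ("Math", "Division", "CCSS.MATH.CONTENT.4.NBT.B.6: Find whole-number quotients using strategies based on place value"),
--     ("Math", "Division", "CCSS.MATH.CONTENT.5.NBT.B.6: Find quotients of whole numbers with up to four-digit dividends"),
--     ("Math", "Fractions", "CCSS.MATH.CONTENT.3.NF.A.1: Understand a fraction as a part of a whole"),
--     ("Math", "Fractions", "CCSS.MATH.CONTENT.4.NF.A.1: Explain why fractions are equivalent"),
--     ("Math", "Fractions", "CCSS.MATH.CONTENT.5.NF.A.1: Add and subtract fractions with unlike denominators"),
--     ("ELA", "Reading", "CCSS.ELA-LITERACY.RL.3.1: Ask and answer questions to demonstrate understanding"),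
--     ("ELA", "Reading", "CCSS.ELA-LITERACY.RL.4.2: Determine theme from details; summarize"),
--     ("ELA", "Reading", "CCSS.ELA-LITERACY.RL.5.3: Compare and contrast characters, settings, events"),
-- ]
--
-- def get_common_core_standards(subject: str, grade: str = "") -> List[Dict]:
--     """Get Common Core standards information (flat-table version)."""
--     return [{'standard': s, 'topic': t} for (subj, t, s) in _CCSS if subj == subject]
-- ===== Notes on version B (the rewrite author's own statement) =====
-- stated objective: simpler
-- what changed: Replaces the nested subject->topic->standards dict plus two-level loop with extend by a single flat record table filtered by subject in one comprehension.
import Mathlib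
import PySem

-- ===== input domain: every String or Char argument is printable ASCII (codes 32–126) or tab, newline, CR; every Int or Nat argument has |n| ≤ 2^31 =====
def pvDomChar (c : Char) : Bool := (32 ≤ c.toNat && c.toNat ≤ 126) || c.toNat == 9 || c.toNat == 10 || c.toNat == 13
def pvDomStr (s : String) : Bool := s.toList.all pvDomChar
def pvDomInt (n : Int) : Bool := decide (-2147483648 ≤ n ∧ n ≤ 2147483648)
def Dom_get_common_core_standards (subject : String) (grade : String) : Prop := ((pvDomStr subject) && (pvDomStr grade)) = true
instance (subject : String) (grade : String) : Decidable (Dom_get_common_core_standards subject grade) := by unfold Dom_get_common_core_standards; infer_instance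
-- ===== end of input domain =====

-- B replaces A's nested subject→topic→standards dict and two-level extend loop
-- with one flat record table filtered by subject in a single pass (objective: simpler).


-- ===== PORT A =====
-- A's nested dict literal: subject → (topic → list of standards)
def ccssStandardsA : PySem.Dict String (PySem.Dict String (List String)) :=
  PySem.Dict.ofList
    [ ("Math", PySem.Dict.ofList
        [ ("Division",
            [ "CCSS.MATH.CONTENT.3.OA.A.2: Interpret whole-number quotients of whole numbers"
            , "CCSS.MATH.CONTENT.3.OA.A.3: Use multiplication and division within 100 to solve word problems"
            , "CCSS.MATH.CONTENT.4.NBT.B.6: Find whole-number quotients using strategies based on place value"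
            , "CCSS.MATH.CONTENT.5.NBT.B.6: Find quotients of whole numbers with up to four-digit dividends" ])
        , ("Fractions",
            [ "CCSS.MATH.CONTENT.3.NF.A.1: Understand a fraction as a part of a whole"
            , "CCSS.MATH.CONTENT.4.NF.A.1: Explain why fractions are equivalent"
            , "CCSS.MATH.CONTENT.5.NF.A.1: Add and subtract fractions with unlike denominators" ]) ])
    , ("ELA", PySem.Dict.ofList
        [ ("Reading",
            [ "CCSS.ELA-LITERACY.RL.3.1: Ask and answer questions to demonstrate understanding"
            , "CCSS.ELA-LITERACY.RL.4.2: Determine theme from details; summarize"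
            , "CCSS.ELA-LITERACY.RL.5.3: Compare and contrast characters, settings, events" ]) ]) ]

def get_common_core_standards (subject : String) (grade : String) : List (List (String × String)) :=
  let subject_data := (ccssStandardsA.get? subject).getD PySem.Dict.empty
  subject_data.items.foldl
    (fun results ts =>
      results ++ ts.2.map (fun s => [("standard", s), ("topic", ts.1)]))
    []

-- ===== PORT B =====
-- B's flat record table: (subject, topic, standard), already in A's emission order.
def ccssFlat : List (String × String × String) :=
  [ ("Math", "Division", "CCSS.MATH.CONTENT.3.OA.A.2: Interpret whole-number quotients of whole numbers")
  , ("Math", "Division", "CCSS.MATH.CONTENT.3.OA.A.3: Use multiplication and division within 100 to solve word problems")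
  , ("Math", "Division", "CCSS.MATH.CONTENT.4.NBT.B.6: Find whole-number quotients using strategies based on place value")
  , ("Math", "Division", "CCSS.MATH.CONTENT.5.NBT.B.6: Find quotients of whole numbers with up to four-digit dividends")
  , ("Math", "Fractions", "CCSS.MATH.CONTENT.3.NF.A.1: Understand a fraction as a part of a whole")
  , ("Math", "Fractions", "CCSS.MATH.CONTENT.4.NF.A.1: Explain why fractions are equivalent")
  , ("Math", "Fractions", "CCSS.MATH.CONTENT.5.NF.A.1: Add and subtract fractions with unlike denominators")
  , ("ELA", "Reading", "CCSS.ELA-LITERACY.RL.3.1: Ask and answer questions to demonstrate understanding")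
  , ("ELA", "Reading", "CCSS.ELA-LITERACY.RL.4.2: Determine theme from details; summarize")
  , ("ELA", "Reading", "CCSS.ELA-LITERACY.RL.5.3: Compare and contrast characters, settings, events") ]

def get_common_core_standards_alt (subject : String) (grade : String) : List (List (String × String)) :=
  (ccssFlat.filter (fun r => r.1 == subject)).map
    (fun r => [("standard", r.2.2), ("topic", r.2.1)])

-- ===== PRECONDITION & SPEC =====
def Spec_get_common_core_standards (subject : String) (grade : String) (out : List (List (String × String))) : Prop := out = get_common_core_standards_alt subject grade
instance (subject : String) (grade : String) (out : List (List (String × String))) : Decidable (Spec_get_common_core_standards subject grade out) := by unfold Spec_get_common_core_standards; infer_instance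

-- ===== CLAIM (what is proved, stated in full; the proofs are below) =====
def Claim_equal_get_common_core_standards : Prop := ∀ (subject : String) (grade : String), Dom_get_common_core_standards subject grade → Spec_get_common_core_standards subject grade (get_common_core_standards subject grade)

-- ===== LEMMAS AND PROOFS =====

-- ===== VERDICT (by name: the statement is the Claim_ definition above) =====
-- when the subject is neither "Math" nor "ELA", A's dict lookup yields none
theorem ccss_get_none (s : String) (hM : s ≠ "Math") (hE : s ≠ "ELA") :
    ccssStandardsA.get? s = none := by
  simp [ccssStandardsA, PySem.Dict.ofList, PySem.Dict.update, PySem.Dict.get?_insert,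
    PySem.Dict.get?_empty, hM, hE]

theorem get_common_core_standards_spec : Claim_equal_get_common_core_standards := by
  intro subject grade _
  unfold Spec_get_common_core_standards
  by_cases hM : subject = "Math"
  · subst hM; rfl
  · by_cases hE : subject = "ELA"
    · subst hE; rfl
    · have h1 : (("Math" : String) == subject) = false := by
        simp [Ne.symm hM]
      have h2 : (("ELA" : String) == subject) = false := by
        simp [Ne.symm hE]
      simp [get_common_core_standards, get_common_core_standards_alt, ccssFlat,
        ccss_get_none subject hM hE, h1, h2, PySem.Dict.empty]
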